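-- pv_equiv track=rewrite | github.com/mkdirswk/algorithm | programmers/Python/Level1/l1_Create Strange Characters_servertry.py | solution
-- ===== SOURCE A (Python) =====
-- def solution(s):
--     string_count = 0
--     all_count = 0
--     new_str = ''
--     for m in s:
--         if m == ' ':
--             string_count = 0
--         elif m != ' ':
--             string_count += 1
--
--         if string_count != 0 and string_count % 2 == 1:
--             new_str += s[all_count].lower()
--         elif string_count != 0 and string_count % 2 == 0:
--             new_str += s[all_count].upper()
--         else:
--             new_str += m
--
--         all_count += 1
--
--     return new_str
-- ===== SOURCE B (Python) =====
-- def solution(s):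
--     return ' '.join(
--         ''.join(c.lower() if i % 2 == 0 else c.upper() for i, c in enumerate(w))
--         for w in s.split(' ')
--     )
-- ===== Notes on version B (the rewrite author's own statement) =====
-- stated objective: simpler
-- what changed: A's single char-by-char loop with a manually reset word-position counter and s[all_count] indexing is replaced by splitting on the space character, toggling case per word via enumerate parity, and rejoining with spaces, which reconstructs the spacing exactly.
import Mathlib
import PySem

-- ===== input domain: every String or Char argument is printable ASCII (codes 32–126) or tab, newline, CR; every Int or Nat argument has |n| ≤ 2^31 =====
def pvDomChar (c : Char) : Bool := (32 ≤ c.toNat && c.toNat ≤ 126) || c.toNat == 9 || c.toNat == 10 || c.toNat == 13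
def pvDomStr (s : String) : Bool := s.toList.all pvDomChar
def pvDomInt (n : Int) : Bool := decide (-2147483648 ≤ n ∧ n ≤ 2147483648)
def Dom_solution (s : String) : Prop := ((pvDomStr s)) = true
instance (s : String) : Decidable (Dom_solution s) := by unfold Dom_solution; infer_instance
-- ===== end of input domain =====

-- B replaces A's char-by-char loop (manual word-position counter reset on spaces, indexing s[all_count])
-- by split(' ') / per-word enumerate / ' '.join — objective: simpler.

-- ===== PORT A =====
-- A's loop: state (string_count, all_count, new_str); s[all_count] is always in range while the loop
-- runs, so the pyGetD default ' ' is never used.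
def solution (s : String) : String :=
  let cs := s.toList
  let fin :=
    cs.foldl
      (fun (st : Int × Int × List Char) m =>
        let sc := if m == ' ' then (0 : Int) else if m != ' ' then st.1 + 1 else st.1
        let ch := PySem.List.pyGetD cs st.2.1 ' '
        let nw :=
          if sc ≠ 0 ∧ PySem.Int.mod sc 2 = 1 then st.2.2 ++ [PySem.Chars.lowerChar ch]
          else if sc ≠ 0 ∧ PySem.Int.mod sc 2 = 0 then st.2.2 ++ [PySem.Chars.upperChar ch]
          else st.2.2 ++ [m]
        (sc, st.2.1 + 1, nw))
      (0, 0, [])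
  String.mk fin.2.2

-- ===== PORT B =====
def solution_alt (s : String) : String :=
  let words := PySem.Chars.splitOn s.toList [' ']
  let proc := words.map (fun w =>
    (PySem.List.enumerate w).map (fun p =>
      if PySem.Int.mod p.1 2 = 0 then PySem.Chars.lowerChar p.2 else PySem.Chars.upperChar p.2))
  String.mk (PySem.Chars.join [' '] proc)

-- ===== PRECONDITION & SPEC =====
def Spec_solution (s : String) (out : String) : Prop := out = solution_alt s
instance (s : String) (out : String) : Decidable (Spec_solution s out) := by unfold Spec_solution; infer_instance

-- ===== CLAIM (what is proved, stated in full; the proofs are below) =====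
def Claim_equal_solution : Prop := ∀ (s : String), Dom_solution s → Spec_solution s (solution s)

-- ===== LEMMAS AND PROOFS =====

-- Structural form of splitting a char list at the literal ' '.
def pvSplit : List Char → List (List Char)
  | [] => [[]]
  | c :: t => if c = ' ' then [] :: pvSplit t else (pvSplit t).modifyHead (c :: ·)

lemma pvModifyHead_id {α : Type} (l : List α) : l.modifyHead (fun x => x) = l := by
  cases l <;> simp

lemma pvSplit_ne_nil (l : List Char) : pvSplit l ≠ [] := by
  cases l with
  | nil => simp [pvSplit]
  | cons c t =>
    simp only [pvSplit]
    split_ifs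
    · simp
    · cases h : pvSplit t with
      | nil => exact absurd h (pvSplit_ne_nil t)
      | cons w ws => simp

lemma splitOn_go_eq (l : List Char) : ∀ (fuel : Nat) (cur : List Char) (acc : List (List Char)),
    l.length < fuel →
    PySem.Chars.splitOn.go [' '] fuel l cur acc
      = acc.reverse ++ (pvSplit l).modifyHead (cur.reverse ++ ·) := by
  induction l with
  | nil =>
    intro fuel cur acc h
    obtain ⟨f, rfl⟩ : ∃ f, fuel = f + 1 := ⟨fuel - 1, by omega⟩
    rw [PySem.Chars.splitOn.go]
    simp [pvSplit]
    omega
  | cons c t ih =>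
    intro fuel cur acc h
    obtain ⟨f, rfl⟩ : ∃ f, fuel = f + 1 := ⟨fuel - 1, by omega⟩
    rw [PySem.Chars.splitOn.go]
    have hpre : [' '].isPrefixOf (c :: t) = (c = ' ' : Bool) := by
      by_cases hc : c = ' '
      · subst hc; simp [List.isPrefixOf]
      · simp [List.isPrefixOf, hc, Ne.symm hc]
    rw [hpre]
    by_cases hc : c = ' '
    · subst hc
      simp only [decide_true, if_pos, List.length_singleton, List.drop_succ_cons, List.drop_zero]
      rw [ih f [] (cur.reverse :: acc) (by simpa using Nat.lt_of_succ_lt_succ h)]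
      simp [pvSplit, pvModifyHead_id]
    · simp only [hc, decide_false, Bool.false_eq_true, if_neg, not_false_iff]
      rw [ih f (c :: cur) acc (by simpa using Nat.lt_of_succ_lt_succ h)]
      simp only [pvSplit, hc, if_neg, not_false_iff]
      cases hps : pvSplit t with
      | nil => exact absurd hps (pvSplit_ne_nil t)
      | cons w ws => simp

lemma splitOn_eq_pvSplit (l : List Char) :
    PySem.Chars.splitOn l [' '] = pvSplit l := by
  have := splitOn_go_eq l (l.length + 1) [] [] (by omega)
  simpa [PySem.Chars.splitOn, pvModifyHead_id] using this

-- A's emitted output on a suffix, starting with word-position counter k.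
def pvRun : Nat → List Char → List Char
  | _, [] => []
  | k, m :: t =>
    if m = ' ' then ' ' :: pvRun 0 t
    else (if k % 2 = 0 then PySem.Chars.lowerChar m else PySem.Chars.upperChar m) :: pvRun (k + 1) t

-- B's per-word processing, with the enumerate counter started at k.
def pvProc (k : Nat) (w : List Char) : List Char :=
  (PySem.List.enumerate w (k : Int)).map (fun p =>
    if PySem.Int.mod p.1 2 = 0 then PySem.Chars.lowerChar p.2 else PySem.Chars.upperChar p.2)

lemma pvProc_nil (k : Nat) : pvProc k [] = [] := by
  simp [pvProc, PySem.List.enumerate_nil]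

lemma pvProc_cons (k : Nat) (c : Char) (w : List Char) :
    pvProc k (c :: w)
      = (if k % 2 = 0 then PySem.Chars.lowerChar c else PySem.Chars.upperChar c) :: pvProc (k + 1) w := by
  have hmod : PySem.Int.mod (k : Int) 2 = ((k % 2 : Nat) : Int) := PySem.Int.mod_natCast k 2
  have harg : (k : Int) + 1 = ((k + 1 : Nat) : Int) := by push_cast; ring
  simp only [pvProc, PySem.List.enumerate_cons, List.map_cons, hmod, harg]
  rcases Nat.mod_two_eq_zero_or_one k with hk | hk <;> simp [hk]

-- the real statement: head word processed from k, the rest from 0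
def pvJoinFrom (k : Nat) (l : List Char) : List Char :=
  match pvSplit l with
  | [] => []
  | w :: ws => PySem.Chars.join [' '] (pvProc k w :: ws.map (pvProc 0))

lemma pvJoinFrom_eq_pvRun (l : List Char) : ∀ (k : Nat), pvJoinFrom k l = pvRun k l := by
  induction l with
  | nil => intro k; simp [pvJoinFrom, pvSplit, pvProc_nil, PySem.Chars.join, List.intercalate, pvRun]
  | cons c t ih =>
    intro k
    by_cases hc : c = ' '
    · subst hc
      simp only [pvJoinFrom, pvSplit]
      have h0 := ih 0
      simp only [pvJoinFrom] at h0
      cases hps : pvSplit t with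
      | nil => exact absurd hps (pvSplit_ne_nil t)
      | cons w ws =>
        rw [hps] at h0
        simp only [pvRun, ← h0]
        simp [PySem.Chars.join, List.intercalate, pvProc_nil]
    · simp only [pvJoinFrom, pvSplit, if_neg hc]
      cases hps : pvSplit t with
      | nil => exact absurd hps (pvSplit_ne_nil t)
      | cons w ws =>
        have hk := ih (k + 1)
        simp only [pvJoinFrom, hps] at hk
        simp only [List.modifyHead, pvProc_cons]
        rw [pvRun, if_neg hc, ← hk]
        cases ws <;> simp [PySem.Chars.join, List.intercalate]

-- A's foldl over the suffix t of cs (all_count = length of the prefix) emits pvRun.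
lemma foldA_eq (cs : List Char) : ∀ (t p out : List Char) (sc : Nat), cs = p ++ t →
    (t.foldl
      (fun (st : Int × Int × List Char) m =>
        let sc := if m == ' ' then (0 : Int) else if m != ' ' then st.1 + 1 else st.1
        let ch := PySem.List.pyGetD cs st.2.1 ' '
        let nw :=
          if sc ≠ 0 ∧ PySem.Int.mod sc 2 = 1 then st.2.2 ++ [PySem.Chars.lowerChar ch]
          else if sc ≠ 0 ∧ PySem.Int.mod sc 2 = 0 then st.2.2 ++ [PySem.Chars.upperChar ch]
          else st.2.2 ++ [m]
        (sc, st.2.1 + 1, nw))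
      ((sc : Int), (p.length : Int), out)).2.2 = out ++ pvRun sc t := by
  intro t
  induction t with
  | nil => intro p out sc h; simp [pvRun]
  | cons m t' ih =>
    intro p out sc h
    have hch : PySem.List.pyGetD cs ((p.length : Int)) ' ' = m := by
      subst h; simp [PySem.List.pyGetD_natCast]
    rw [List.foldl_cons]
    by_cases hm : m = ' '
    · subst hm
      have hst := ih (p ++ [' ']) (out ++ [' ']) 0 (by simpa using h)
      simp only [beq_self_eq_true, if_pos, ne_eq, not_true_eq_false, false_and, if_false, hch,
        List.length_append, List.length_singleton] at hst ⊢
      have hcast : (p.length : Int) + 1 = ((p.length + 1 : Nat) : Int) := by push_cast; ring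
      rw [hcast]
      simpa [pvRun] using hst
    · have hm' : (m == ' ') = false := by simp [hm]
      have hm'' : (m != ' ') = true := by simp [hm]
      have hne : ((sc : Int) + 1) ≠ 0 := by omega
      have hcast : (p.length : Int) + 1 = ((p.length + 1 : Nat) : Int) := by push_cast; ring
      have hcast2 : (sc : Int) + 1 = ((sc + 1 : Nat) : Int) := by push_cast; ring
      have hmodn : PySem.Int.mod ((sc : Int) + 1) 2 = (((sc + 1) % 2 : Nat) : Int) := by
        rw [hcast2]; exact_mod_cast PySem.Int.mod_natCast (sc + 1) 2
      dsimp only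
      simp only [hm', hm'', Bool.false_eq_true, if_false, if_true, hch]
      rcases Nat.mod_two_eq_zero_or_one sc with hk | hk
      · have hodd : (sc + 1) % 2 = 1 := by omega
        have hmod1 : PySem.Int.mod ((sc : Int) + 1) 2 = 1 := by rw [hmodn, hodd]; norm_num
        rw [if_pos ⟨hne, hmod1⟩]
        have hst := ih (p ++ [m]) (out ++ [PySem.Chars.lowerChar m]) (sc + 1) (by simpa using h)
        simp only [List.length_append, List.length_singleton] at hst
        rw [hcast, hcast2, hst]
        conv_rhs => rw [pvRun]
        simp [hm, hk]
      · have hev : (sc + 1) % 2 = 0 := by omega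
        have hmod0 : PySem.Int.mod ((sc : Int) + 1) 2 = 0 := by rw [hmodn, hev]; norm_num
        rw [if_neg (by rw [hmod0]; simp), if_pos ⟨hne, hmod0⟩]
        have hst := ih (p ++ [m]) (out ++ [PySem.Chars.upperChar m]) (sc + 1) (by simpa using h)
        simp only [List.length_append, List.length_singleton] at hst
        rw [hcast, hcast2, hst]
        conv_rhs => rw [pvRun]
        simp [hm, hk]

-- ===== VERDICT (by name: the statement is the Claim_ definition above) =====
theorem solution_spec : Claim_equal_solution := by
  intro s _
  unfold Spec_solution solution solution_alt
  dsimp only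
  have hA := foldA_eq s.toList s.toList [] [] 0 (by simp)
  simp only [List.length_nil, Nat.cast_zero] at hA
  rw [hA]
  have hB := pvJoinFrom_eq_pvRun s.toList 0
  rw [splitOn_eq_pvSplit]
  have : (pvSplit s.toList).map (fun w =>
      (PySem.List.enumerate w).map (fun p =>
        if PySem.Int.mod p.1 2 = 0 then PySem.Chars.lowerChar p.2 else PySem.Chars.upperChar p.2))
      = (pvSplit s.toList).map (pvProc 0) := by
    simp [pvProc]
  rw [this]
  cases hps : pvSplit s.toList with
  | nil => exact absurd hps (pvSplit_ne_nil _)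
  | cons w ws =>
    simp only [pvJoinFrom, hps] at hB
    simp only [List.map_cons]
    rw [hB]
    simp
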